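-- pv_equiv track=rewrite | github.com/MegaGiciorPortas/WDI-Zadania | 01-zmienne/1.49.py | suma_cyfr
-- ===== SOURCE A (Python) =====
-- def suma_cyfr(a, n):
--     suma = 0
--     while a > 0:
--         suma += a % 10
--         a //= 10
--     if suma == n:
--         return True
--     return False
-- ===== SOURCE B (Python) =====
-- def suma_cyfr(a, n):
--     total = sum(int(c) for c in str(a)) if a > 0 else 0
--     return total == n
-- ===== Notes on version B (the rewrite author's own statement) =====
-- stated objective: idiomatic
-- what changed: B computes the digit sum by summing the digit characters of str(a) (guarded by a > 0, matching A's zero sum for non-positive a) instead of A's %10//10 peeling loop.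
import Mathlib
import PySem

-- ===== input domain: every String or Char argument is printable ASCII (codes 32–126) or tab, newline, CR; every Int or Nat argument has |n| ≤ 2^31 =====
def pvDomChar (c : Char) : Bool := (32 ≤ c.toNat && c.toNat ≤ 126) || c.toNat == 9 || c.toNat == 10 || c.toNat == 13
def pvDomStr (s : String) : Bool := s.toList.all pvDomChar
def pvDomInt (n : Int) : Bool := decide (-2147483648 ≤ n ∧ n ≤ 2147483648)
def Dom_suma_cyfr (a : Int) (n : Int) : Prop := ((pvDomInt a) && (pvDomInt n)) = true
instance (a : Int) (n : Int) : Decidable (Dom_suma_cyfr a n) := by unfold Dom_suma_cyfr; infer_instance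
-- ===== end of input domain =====

-- B sums the digit characters of str(a) (guarded by a > 0) instead of A's %10 // 10 peeling loop.

-- ===== PORT A =====
-- while a > 0: suma += a % 10; a //= 10
def sumaCyfrLoop (a : Int) (suma : Int) : Int :=
  if 0 < a then
    sumaCyfrLoop (PySem.Int.floordiv a 10) (suma + PySem.Int.mod a 10)
  else suma
  termination_by a.toNat
  decreasing_by
    simp only [PySem.Int.floordiv]
    rw [Int.fdiv_eq_ediv_of_nonneg _ (by norm_num)]
    omega

def suma_cyfr (a : Int) (n : Int) : Bool :=
  let suma := sumaCyfrLoop a 0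
  if suma = n then true else false

-- ===== PORT B =====
-- int(c) on a single decimal digit character c equals c's code minus 48 (exact on the digits of str(a) for a > 0)
def digitVal (c : Char) : Int := (c.toNat : Int) - 48

def suma_cyfr_alt (a : Int) (n : Int) : Bool :=
  let total : Int := if 0 < a then ((PySem.Int.toChars a).map digitVal).sum else 0
  total == n

-- ===== PRECONDITION & SPEC =====
def Spec_suma_cyfr (a : Int) (n : Int) (out : Bool) : Prop := out = suma_cyfr_alt a n
instance (a : Int) (n : Int) (out : Bool) : Decidable (Spec_suma_cyfr a n out) := by unfold Spec_suma_cyfr; infer_instance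

-- ===== CLAIM (what is proved, stated in full; the proofs are below) =====
def Claim_equal_suma_cyfr : Prop := ∀ (a : Int) (n : Int), Dom_suma_cyfr a n → Spec_suma_cyfr a n (suma_cyfr a n)

-- ===== LEMMAS AND PROOFS =====

lemma digitVal_digitChar (d : Nat) (hd : d < 10) : digitVal (Nat.digitChar d) = d := by
  interval_cases d <;> rfl

lemma toDigitsCore_sum (fuel : Nat) : ∀ (m : Nat) (ds : List Char), m < fuel →
    ((Nat.toDigitsCore 10 fuel m ds).map digitVal).sum
      = ((Nat.digits 10 m).sum : Int) + ((ds.map digitVal).sum) := by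
  induction fuel with
  | zero => intro m ds h; omega
  | succ f ih =>
    intro m ds h
    rw [Nat.toDigitsCore]
    by_cases h0 : m / 10 = 0
    · simp only [h0]
      rcases Nat.eq_zero_or_pos m with hm | hm
      · subst hm; simp [digitVal]; decide
      · rw [Nat.digits_def' (by norm_num : 1 < 10) hm, h0]
        simp [digitVal_digitChar (m % 10) (Nat.mod_lt _ (by norm_num))]
    · rw [if_neg h0]
      have hm : 0 < m := by
        rcases Nat.eq_zero_or_pos m with hm | hm
        · exfalso; apply h0; omega
        · exact hm
      rw [ih (m / 10) _ (by omega)]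
      rw [Nat.digits_def' (by norm_num : 1 < 10) hm]
      simp only [List.map_cons, List.sum_cons,
        digitVal_digitChar (m % 10) (Nat.mod_lt _ (by norm_num))]
      push_cast
      ring

lemma toChars_digit_sum (a : Int) (ha : 0 < a) :
    ((PySem.Int.toChars a).map digitVal).sum = ((Nat.digits 10 a.toNat).sum : Int) := by
  simp only [PySem.Int.toChars, if_neg (by omega : ¬ a < 0), Nat.toDigits]
  rw [toDigitsCore_sum (a.toNat + 1) a.toNat [] (by omega)]
  simp

lemma sumaCyfrLoop_eq (a : Int) (suma : Int) (ha : 0 ≤ a) :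
    sumaCyfrLoop a suma = ((Nat.digits 10 a.toNat).sum : Int) + suma := by
  induction a, suma using sumaCyfrLoop.induct with
  | case1 a suma hpos ih =>
    rw [sumaCyfrLoop, if_pos hpos]
    have hdiv : PySem.Int.floordiv a 10 = a / 10 := by
      simp only [PySem.Int.floordiv]; exact Int.fdiv_eq_ediv_of_nonneg a (by norm_num)
    have hmod : PySem.Int.mod a 10 = a % 10 := by
      simp only [PySem.Int.mod]; exact Int.fmod_eq_emod_of_nonneg a (by norm_num)
    rw [ih (by rw [hdiv]; omega)]
    rw [Nat.digits_def' (by norm_num : 1 < 10) (by omega : 0 < a.toNat)]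
    rw [hdiv, hmod]
    have h1 : (a / 10).toNat = a.toNat / 10 := by omega
    have h2 : (a % 10) = ((a.toNat % 10 : Nat) : Int) := by omega
    rw [h1, h2, List.sum_cons]
    push_cast
    ring
  | case2 a suma hpos =>
    rw [sumaCyfrLoop, if_neg hpos]
    have ha0 : a.toNat = 0 := by omega
    rw [ha0]
    simp

-- ===== VERDICT (by name: the statement is the Claim_ definition above) =====
theorem suma_cyfr_spec : Claim_equal_suma_cyfr := by
  intro a n _
  unfold Spec_suma_cyfr suma_cyfr suma_cyfr_alt
  have key : ∀ (x y : Int), (if x = y then true else false) = (x == y) := by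
    intro x y; by_cases h : x = y <;> simp [h]
  by_cases ha : 0 < a
  · simp only [if_pos ha]
    rw [sumaCyfrLoop_eq a 0 (by omega), toChars_digit_sum a ha, add_zero]
    exact key _ n
  · rw [sumaCyfrLoop, if_neg ha]
    simp only [if_neg ha]
    exact key 0 n
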